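-- pv_equiv track=rewrite | github.com/devvrat-hans/algo-trading | config.py | get_instrument_info
-- ===== SOURCE A (Python) =====
-- INSTRUMENTS = {
--     "indices": {
--         "NIFTY50": {
--             "symbol": "^NSEI",
--             "name": "Nifty 50",
--             "exchange": "NSE",
--             "description": "NSE Nifty 50 Index"
--         },
--         "BANKNIFTY": {
--             "symbol": "^NSEBANK",
--             "name": "Bank Nifty",
--             "exchange": "NSE",
--             "description": "NSE Bank Nifty Index"
--         },
--         "SENSEX": {
--             "symbol": "^BSESN",
--             "name": "Sensex",
--             "exchange": "BSE",
--             "description": "BSE Sensex Index"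
--         }
--     },
--
--     "stocks": {
--         "RELIANCE": {
--             "symbol": "RELIANCE.NS",
--             "name": "Reliance Industries",
--             "exchange": "NSE",
--             "sector": "Oil & Gas"
--         },
--         "TCS": {
--             "symbol": "TCS.NS",
--             "name": "Tata Consultancy Services",
--             "exchange": "NSE",
--             "sector": "IT"
--         },
--         "HDFCBANK": {
--             "symbol": "HDFCBANK.NS",
--             "name": "HDFC Bank",
--             "exchange": "NSE",
--             "sector": "Banking"
--         },
--         "INFY": {
--             "symbol": "INFY.NS",
--             "name": "Infosys",
--             "exchange": "NSE",
--             "sector": "IT"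
--         },
--         "ICICIBANK": {
--             "symbol": "ICICIBANK.NS",
--             "name": "ICICI Bank",
--             "exchange": "NSE",
--             "sector": "Banking"
--         }
--     },
--
--     "etfs": {
--         "NIFTYBEES": {
--             "symbol": "NIFTYBEES.NS",
--             "name": "Nippon India ETF Nifty BeES",
--             "exchange": "NSE",
--             "tracks": "NIFTY50"
--         },
--         "BANKBEES": {
--             "symbol": "BANKBEES.NS",
--             "name": "Nippon India ETF Bank BeES",
--             "exchange": "NSE",
--             "tracks": "BANKNIFTY"
--         }
--     }
-- }
--
-- def get_instrument_info(symbol: str) -> dict: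
--     """
--     Get instrument information by symbol
--
--     Args:
--         symbol: The symbol to search for
--
--     Returns:
--         dict: Instrument information or None if not found
--     """
--     for inst_type, instruments in INSTRUMENTS.items():
--         for inst_name, inst_data in instruments.items():
--             if inst_data["symbol"] == symbol:
--                 return {
--                     "type": inst_type,
--                     "name": inst_name,
--                     **inst_data
--                 }
--     return None
-- ===== SOURCE B (Python) =====
-- # Flat reverse index written out once: symbol -> full merged record.
-- # Each record carries the same keys in the same order as A's merge
-- # ({"type": t, "name": n, **inst_data}: the embedded "name" overrides the dict key).
-- SYMBOL_INDEX = {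
--     "^NSEI": {"type": "indices", "name": "Nifty 50", "symbol": "^NSEI", "exchange": "NSE", "description": "NSE Nifty 50 Index"},
--     "^NSEBANK": {"type": "indices", "name": "Bank Nifty", "symbol": "^NSEBANK", "exchange": "NSE", "description": "NSE Bank Nifty Index"},
--     "^BSESN": {"type": "indices", "name": "Sensex", "symbol": "^BSESN", "exchange": "BSE", "description": "BSE Sensex Index"},
--     "RELIANCE.NS": {"type": "stocks", "name": "Reliance Industries", "symbol": "RELIANCE.NS", "exchange": "NSE", "sector": "Oil & Gas"},
--     "TCS.NS": {"type": "stocks", "name": "Tata Consultancy Services", "symbol": "TCS.NS", "exchange": "NSE", "sector": "IT"},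
--     "HDFCBANK.NS": {"type": "stocks", "name": "HDFC Bank", "symbol": "HDFCBANK.NS", "exchange": "NSE", "sector": "Banking"},
--     "INFY.NS": {"type": "stocks", "name": "Infosys", "symbol": "INFY.NS", "exchange": "NSE", "sector": "IT"},
--     "ICICIBANK.NS": {"type": "stocks", "name": "ICICI Bank", "symbol": "ICICIBANK.NS", "exchange": "NSE", "sector": "Banking"},
--     "NIFTYBEES.NS": {"type": "etfs", "name": "Nippon India ETF Nifty BeES", "symbol": "NIFTYBEES.NS", "exchange": "NSE", "tracks": "NIFTY50"},
--     "BANKBEES.NS": {"type": "etfs", "name": "Nippon India ETF Bank BeES", "symbol": "BANKBEES.NS", "exchange": "NSE", "tracks": "BANKNIFTY"},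
-- }
--
-- def get_instrument_info(symbol: str) -> dict:
--     return SYMBOL_INDEX.get(symbol)
-- ===== Notes on version B (the rewrite author's own statement) =====
-- stated objective: simpler
-- what changed: Replaces the nested scan over the hierarchical INSTRUMENTS table with a flat literal reverse index (symbol -> fully merged record), so the function is a single dict .get with no loops.
import Mathlib
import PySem

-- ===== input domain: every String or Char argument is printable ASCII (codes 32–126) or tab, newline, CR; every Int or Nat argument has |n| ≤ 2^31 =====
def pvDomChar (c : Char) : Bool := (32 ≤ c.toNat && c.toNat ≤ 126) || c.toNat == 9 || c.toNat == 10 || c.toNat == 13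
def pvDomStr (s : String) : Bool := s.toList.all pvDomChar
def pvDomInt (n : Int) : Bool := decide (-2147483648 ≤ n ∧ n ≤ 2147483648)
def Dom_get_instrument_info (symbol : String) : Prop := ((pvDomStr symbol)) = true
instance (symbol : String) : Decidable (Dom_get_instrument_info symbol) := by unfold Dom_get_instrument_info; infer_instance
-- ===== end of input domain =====

-- B replaces A's nested scan over the hierarchical table with a single lookup in a flat literal reverse index; objective: simpler.

-- ===== PORT A =====
-- the module constant INSTRUMENTS (dicts as insertion-ordered association lists)
def pvINSTRUMENTS : List (String × List (String × PySem.Dict String String)) :=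
  [("indices",
    [("NIFTY50",   PySem.Dict.mk [("symbol", "^NSEI"), ("name", "Nifty 50"), ("exchange", "NSE"), ("description", "NSE Nifty 50 Index")]),
     ("BANKNIFTY", PySem.Dict.mk [("symbol", "^NSEBANK"), ("name", "Bank Nifty"), ("exchange", "NSE"), ("description", "NSE Bank Nifty Index")]),
     ("SENSEX",    PySem.Dict.mk [("symbol", "^BSESN"), ("name", "Sensex"), ("exchange", "BSE"), ("description", "BSE Sensex Index")])]),
   ("stocks",
    [("RELIANCE",  PySem.Dict.mk [("symbol", "RELIANCE.NS"), ("name", "Reliance Industries"), ("exchange", "NSE"), ("sector", "Oil & Gas")]),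
     ("TCS",       PySem.Dict.mk [("symbol", "TCS.NS"), ("name", "Tata Consultancy Services"), ("exchange", "NSE"), ("sector", "IT")]),
     ("HDFCBANK",  PySem.Dict.mk [("symbol", "HDFCBANK.NS"), ("name", "HDFC Bank"), ("exchange", "NSE"), ("sector", "Banking")]),
     ("INFY",      PySem.Dict.mk [("symbol", "INFY.NS"), ("name", "Infosys"), ("exchange", "NSE"), ("sector", "IT")]),
     ("ICICIBANK", PySem.Dict.mk [("symbol", "ICICIBANK.NS"), ("name", "ICICI Bank"), ("exchange", "NSE"), ("sector", "Banking")])]),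
   ("etfs",
    [("NIFTYBEES", PySem.Dict.mk [("symbol", "NIFTYBEES.NS"), ("name", "Nippon India ETF Nifty BeES"), ("exchange", "NSE"), ("tracks", "NIFTY50")]),
     ("BANKBEES",  PySem.Dict.mk [("symbol", "BANKBEES.NS"), ("name", "Nippon India ETF Bank BeES"), ("exchange", "NSE"), ("tracks", "BANKNIFTY")])])]

-- {"type": t, "name": n, **inst_data}  (dict-merge: inserted in order, overwriting in place)
def pvMerge (inst_type inst_name : String) (inst_data : PySem.Dict String String) : PySem.Dict String String :=
  inst_data.items.foldl (fun d kv => PySem.Dict.insert d kv.1 kv.2) (PySem.Dict.mk [("type", inst_type), ("name", inst_name)])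

-- inner loop: for inst_name, inst_data in instruments.items()
-- (inst_data["symbol"] ported as getD with default "": the key is present in every literal entry, so exact here)
def pvScanInner (symbol inst_type : String) : List (String × PySem.Dict String String) → Option (List (String × String))
  | [] => none
  | (inst_name, inst_data) :: rest =>
    if PySem.Dict.getD inst_data "symbol" "" == symbol then
      some (pvMerge inst_type inst_name inst_data).items
    else pvScanInner symbol inst_type rest

-- outer loop: for inst_type, instruments in INSTRUMENTS.items()
def pvScanOuter (symbol : String) : List (String × List (String × PySem.Dict String String)) → Option (List (String × String))
  | [] => none
  | (inst_type, instruments) :: rest =>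
    match pvScanInner symbol inst_type instruments with
    | some r => some r
    | none => pvScanOuter symbol rest

def get_instrument_info (symbol : String) : Option (List (String × String)) :=
  pvScanOuter symbol pvINSTRUMENTS

-- ===== PORT B =====
-- SYMBOL_INDEX of Source B: a flat literal reverse index, symbol -> fully merged record (no loops)
def pvSymbolIndex : PySem.Dict String (List (String × String)) :=
  PySem.Dict.mk
    [("^NSEI",        [("type", "indices"), ("name", "Nifty 50"), ("symbol", "^NSEI"), ("exchange", "NSE"), ("description", "NSE Nifty 50 Index")]),
     ("^NSEBANK",     [("type", "indices"), ("name", "Bank Nifty"), ("symbol", "^NSEBANK"), ("exchange", "NSE"), ("description", "NSE Bank Nifty Index")]),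
     ("^BSESN",       [("type", "indices"), ("name", "Sensex"), ("symbol", "^BSESN"), ("exchange", "BSE"), ("description", "BSE Sensex Index")]),
     ("RELIANCE.NS",  [("type", "stocks"), ("name", "Reliance Industries"), ("symbol", "RELIANCE.NS"), ("exchange", "NSE"), ("sector", "Oil & Gas")]),
     ("TCS.NS",       [("type", "stocks"), ("name", "Tata Consultancy Services"), ("symbol", "TCS.NS"), ("exchange", "NSE"), ("sector", "IT")]),
     ("HDFCBANK.NS",  [("type", "stocks"), ("name", "HDFC Bank"), ("symbol", "HDFCBANK.NS"), ("exchange", "NSE"), ("sector", "Banking")]),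
     ("INFY.NS",      [("type", "stocks"), ("name", "Infosys"), ("symbol", "INFY.NS"), ("exchange", "NSE"), ("sector", "IT")]),
     ("ICICIBANK.NS", [("type", "stocks"), ("name", "ICICI Bank"), ("symbol", "ICICIBANK.NS"), ("exchange", "NSE"), ("sector", "Banking")]),
     ("NIFTYBEES.NS", [("type", "etfs"), ("name", "Nippon India ETF Nifty BeES"), ("symbol", "NIFTYBEES.NS"), ("exchange", "NSE"), ("tracks", "NIFTY50")]),
     ("BANKBEES.NS",  [("type", "etfs"), ("name", "Nippon India ETF Bank BeES"), ("symbol", "BANKBEES.NS"), ("exchange", "NSE"), ("tracks", "BANKNIFTY")])]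

def get_instrument_info_alt (symbol : String) : Option (List (String × String)) :=
  PySem.Dict.get? pvSymbolIndex symbol

-- ===== PRECONDITION & SPEC =====
def Spec_get_instrument_info (symbol : String) (out : Option (List (String × String))) : Prop := out = get_instrument_info_alt symbol
instance (symbol : String) (out : Option (List (String × String))) : Decidable (Spec_get_instrument_info symbol out) := by unfold Spec_get_instrument_info; infer_instance

-- ===== CLAIM (what is proved, stated in full; the proofs are below) =====
def Claim_equal_get_instrument_info : Prop := ∀ (symbol : String), Dom_get_instrument_info symbol → Spec_get_instrument_info symbol (get_instrument_info symbol)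

-- ===== LEMMAS AND PROOFS =====

-- ===== VERDICT (by name: the statement is the Claim_ definition above) =====
theorem get_instrument_info_spec : Claim_equal_get_instrument_info := by
  intro symbol _
  unfold Spec_get_instrument_info
  by_cases h1 : symbol = "^NSEI"; · subst h1; decide
  by_cases h2 : symbol = "^NSEBANK"; · subst h2; decide
  by_cases h3 : symbol = "^BSESN"; · subst h3; decide
  by_cases h4 : symbol = "RELIANCE.NS"; · subst h4; decide
  by_cases h5 : symbol = "TCS.NS"; · subst h5; decide
  by_cases h6 : symbol = "HDFCBANK.NS"; · subst h6; decide
  by_cases h7 : symbol = "INFY.NS"; · subst h7; decide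
  by_cases h8 : symbol = "ICICIBANK.NS"; · subst h8; decide
  by_cases h9 : symbol = "NIFTYBEES.NS"; · subst h9; decide
  by_cases h10 : symbol = "BANKBEES.NS"; · subst h10; decide
  have hB : get_instrument_info_alt symbol = none := by
    rw [get_instrument_info_alt]
    rw [PySem.Dict.get?_eq_none_iff_not_mem_keys]
    have hk : pvSymbolIndex.keys = ["^NSEI", "^NSEBANK", "^BSESN", "RELIANCE.NS", "TCS.NS",
        "HDFCBANK.NS", "INFY.NS", "ICICIBANK.NS", "NIFTYBEES.NS", "BANKBEES.NS"] := by decide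
    simp [hk, h1, h2, h3, h4, h5, h6, h7, h8, h9, h10]
  rw [hB]
  simp [get_instrument_info, pvScanOuter, pvScanInner, pvINSTRUMENTS,
    PySem.Dict.getD, PySem.Dict.get?_mk_cons,
    Ne.symm h1, Ne.symm h2, Ne.symm h3, Ne.symm h4, Ne.symm h5,
    Ne.symm h6, Ne.symm h7, Ne.symm h8, Ne.symm h9, Ne.symm h10]
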